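-- pv_equiv track=rewrite | github.com/LomondComputing/GCSE-CompSci | split-words.py | findSubstrings
-- ===== SOURCE A (Python) =====
-- def countWords(s):
--     newS = s.strip()
--     wordList = newS.split(' ')
--     return len(wordList)
--
-- def findSubstrings(s):
--     numWords = countWords(s)
--     wordList = s.split(' ')
--     substringList = []
--
--     for i in range(numWords):
--         substring = wordList[i]
--         substringList.append(substring)
--         for j in range(i+1,numWords):
--             substring = substring + " " + wordList[j]
--             substringList.append(substring)
--     return substringList
-- ===== SOURCE B (Python) =====
-- def findSubstrings(s):
--     numWords = len(s.strip().split(' '))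
--     wordList = s.split(' ')
--     return [' '.join(wordList[i:j + 1])
--             for i in range(numWords)
--             for j in range(i, numWords)]
-- ===== Notes on version B (the rewrite author's own statement) =====
-- stated objective: simpler
-- what changed: B replaces A's inner loop that threads a growing substring accumulator (and an explicit append-to-list loop) with a flat comprehension that recomputes each word-substring directly as a space-join of the slice wordList[i:j+1].
import Mathlib
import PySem

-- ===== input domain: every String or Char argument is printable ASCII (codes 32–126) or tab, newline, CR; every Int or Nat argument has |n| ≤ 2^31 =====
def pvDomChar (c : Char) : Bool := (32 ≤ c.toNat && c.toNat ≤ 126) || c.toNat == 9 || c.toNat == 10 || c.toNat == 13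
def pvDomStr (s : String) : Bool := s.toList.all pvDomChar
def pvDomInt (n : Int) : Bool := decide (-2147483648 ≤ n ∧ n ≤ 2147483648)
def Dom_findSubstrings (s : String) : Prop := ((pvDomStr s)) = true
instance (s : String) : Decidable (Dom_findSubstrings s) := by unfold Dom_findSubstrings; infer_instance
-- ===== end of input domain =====

-- B builds each word-substring directly as ' '.join(wordList[i:j+1]) in a comprehension instead of
-- threading a running substring accumulator through the inner loop (objective: simpler).

-- ===== PORT A =====
-- s.split(' ') has a non-empty separator, so PySem.Str.split? is always `some`; `.getD []` is unreachable.
def countWords (s : String) : Int :=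
  let newS := PySem.Str.strip s
  let wordList := (PySem.Str.split? newS " ").getD []
  (wordList.length : Int)

-- wordList[i] / wordList[j] never raise in A: the loop bounds numWords ≤ len(wordList)
-- (stripping can only remove separators), so pyGetD's default "" is unreachable.
def findSubstrings (s : String) : List String :=
  let numWords := countWords s
  let wordList := (PySem.Str.split? s " ").getD []
  let substringList : List String := []
  (PySem.List.pyRange 0 numWords 1).foldl (fun substringList i =>
    let substring := PySem.List.pyGetD wordList i ""
    let substringList := substringList ++ [substring]
    ((PySem.List.pyRange (i + 1) numWords 1).foldl
      (fun (st : List String × String) j =>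
        let substring := st.2 ++ " " ++ PySem.List.pyGetD wordList j ""
        (st.1 ++ [substring], substring))
      (substringList, substring)).1) substringList

-- ===== PORT B =====
def findSubstrings_alt (s : String) : List String :=
  let numWords : Int := (((PySem.Str.split? (PySem.Str.strip s) " ").getD []).length : Int)
  let wordList := (PySem.Str.split? s " ").getD []
  (PySem.List.pyRange 0 numWords 1).foldl (fun acc i =>
    (PySem.List.pyRange i numWords 1).foldl (fun acc j =>
      acc ++ [PySem.Str.join " " (PySem.List.slice wordList (some i) (some (j + 1)))]) acc) []

-- ===== PRECONDITION & SPEC =====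
def Spec_findSubstrings (s : String) (out : List String) : Prop := out = findSubstrings_alt s
instance (s : String) (out : List String) : Decidable (Spec_findSubstrings s out) := by unfold Spec_findSubstrings; infer_instance

-- ===== CLAIM (what is proved, stated in full; the proofs are below) =====
def Claim_equal_findSubstrings : Prop := ∀ (s : String), Dom_findSubstrings s → Spec_findSubstrings s (findSubstrings s)

-- ===== LEMMAS AND PROOFS =====

-- `splitOn.go` on a single-character separator: one piece per separator occurrence plus one.
lemma splitOn_go_length (c : Char) :
    ∀ (fuel : Nat) (l cur : List Char) (acc : List (List Char)), l.length < fuel →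
      (PySem.Chars.splitOn.go [c] fuel l cur acc).length = acc.length + 1 + l.count c := by
  intro fuel
  induction fuel with
  | zero => intro l cur acc h; omega
  | succ fuel ih =>
    intro l cur acc h
    cases l with
    | nil => simp [PySem.Chars.splitOn.go]
    | cons x rest =>
      by_cases hx : c = x
      · subst hx
        simp only [PySem.Chars.splitOn.go, List.isPrefixOf, BEq.rfl, Bool.true_and,
          if_true]
        rw [ih _ _ _ (by simpa using Nat.lt_of_succ_lt_succ h)]
        simp
        omega
      · have hpre : [c].isPrefixOf (x :: rest) = false := by
          simp [List.isPrefixOf, hx]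
        simp only [PySem.Chars.splitOn.go, hpre, Bool.false_eq_true, if_false]
        rw [ih _ _ _ (by simpa using Nat.lt_of_succ_lt_succ h)]
        simp [Ne.symm hx]

lemma splitOn_length (c : Char) (l : List Char) :
    (PySem.Chars.splitOn l [c]).length = l.count c + 1 := by
  unfold PySem.Chars.splitOn
  rw [splitOn_go_length c (l.length + 1) l [] [] (by omega)]
  simp
  omega

lemma count_strip_le (c : Char) (l : List Char) :
    (PySem.Chars.strip l).count c ≤ l.count c := by
  unfold PySem.Chars.strip PySem.Chars.rstrip PySem.Chars.lstrip
  calc ((List.dropWhile PySem.Chars.isspace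
          (List.dropWhile PySem.Chars.isspace l).reverse).reverse).count c
      = (List.dropWhile PySem.Chars.isspace
          (List.dropWhile PySem.Chars.isspace l).reverse).count c := List.count_reverse ..
    _ ≤ ((List.dropWhile PySem.Chars.isspace l).reverse).count c :=
        (List.dropWhile_sublist _).count_le c
    _ = (List.dropWhile PySem.Chars.isspace l).count c := List.count_reverse ..
    _ ≤ l.count c := (List.dropWhile_sublist _).count_le c

lemma split_len (s : String) :
    ((PySem.Str.split? s " ").getD []).length = (PySem.Chars.splitOn s.toList [' ']).length := by
  have : (" " : String).toList = [' '] := rfl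
  simp [PySem.Str.split?, this, PySem.Chars.split?]

-- the strip/no-strip quirk is semantically harmless: the stripped count never exceeds len(wordList)
lemma numWords_le (s : String) :
    (((PySem.Str.split? (PySem.Str.strip s) " ").getD []).length : Int)
      ≤ (((PySem.Str.split? s " ").getD []).length : Int) := by
  rw [split_len, split_len]
  have h1 : (PySem.Str.strip s).toList = PySem.Chars.strip s.toList := by
    simp [PySem.Str.strip]
  rw [h1, splitOn_length, splitOn_length]
  exact_mod_cast Nat.add_le_add_right (count_strip_le ' ' s.toList) 1

lemma str_join_append_singleton (xs : List String) (y : String) (h : xs ≠ []) :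
    PySem.Str.join " " (xs ++ [y]) = PySem.Str.join " " xs ++ " " ++ y := by
  have key : ∀ (ps : List (List Char)) (q : List Char), ps ≠ [] →
      PySem.Chars.join [' '] (ps ++ [q]) = PySem.Chars.join [' '] ps ++ [' '] ++ q := by
    intro ps
    induction ps with
    | nil => intro q hq; exact absurd rfl hq
    | cons p ps ih =>
      intro q _
      cases ps with
      | nil => simp [PySem.Chars.join_cons_cons, PySem.Chars.join_singleton]
      | cons p' ps' =>
        have h1 : PySem.Chars.join [' '] ((p :: p' :: ps') ++ [q])
            = p ++ [' '] ++ PySem.Chars.join [' '] ((p' :: ps') ++ [q]) := by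
          simp only [List.cons_append]
          exact PySem.Chars.join_cons_cons ..
        rw [h1, ih q (by simp), PySem.Chars.join_cons_cons]
        simp [List.append_assoc]
  apply String.toList_injective
  have hsep : (" " : String).toList = [' '] := rfl
  simp only [PySem.Str.join, String.toList_ofList, String.toList_append, List.map_append,
    List.map_cons, List.map_nil, hsep]
  rw [key _ _ (by simpa using h)]

lemma slice_single (wl : List String) (i : Int) (hi : 0 ≤ i) (h : i < (wl.length : Int)) :
    PySem.List.slice wl (some i) (some (i + 1)) = [wl.getD i.toNat ""] := by
  rw [PySem.List.slice_toNat wl hi (by omega)]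
  have h1 : (i + 1).toNat = i.toNat + 1 := by omega
  have h2 : i.toNat < wl.length := by omega
  rw [h1, Nat.add_sub_cancel_left]
  rw [List.take_one, List.head?_drop]
  simp [List.getD, List.getElem?_eq_getElem h2]

lemma slice_snoc (wl : List String) (i a : Int) (hi : 0 ≤ i) (hia : i < a)
    (ha : a < (wl.length : Int)) :
    PySem.List.slice wl (some i) (some (a + 1))
      = PySem.List.slice wl (some i) (some a) ++ [wl.getD a.toNat ""] := by
  rw [PySem.List.slice_toNat wl hi (by omega), PySem.List.slice_toNat wl hi (by omega)]
  have h1 : (a + 1).toNat = a.toNat + 1 := by omega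
  have h2 : a.toNat + 1 - i.toNat = (a.toNat - i.toNat) + 1 := by omega
  have h3 : a.toNat - i.toNat < (wl.drop i.toNat).length := by
    simp [List.length_drop]; omega
  rw [h1, h2, List.take_add_one, List.getElem?_eq_getElem h3]
  have h4 : (wl.drop i.toNat)[a.toNat - i.toNat] = wl.getD a.toNat "" := by
    rw [List.getElem_drop]
    have h5 : a.toNat < wl.length := by omega
    have h6 : i.toNat + (a.toNat - i.toNat) = a.toNat := by omega
    simp [h6, List.getD, List.getElem?_eq_getElem h5]
  simp [h4]

lemma slice_nonempty (wl : List String) (i a : Int) (hi : 0 ≤ i) (hia : i < a)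
    (ha : i < (wl.length : Int)) :
    PySem.List.slice wl (some i) (some a) ≠ [] := by
  rw [PySem.List.slice_toNat wl hi (by omega)]
  have : 0 < wl.length - i.toNat := by omega
  intro hcon
  have := congrArg List.length hcon
  simp [List.length_take, List.length_drop] at this
  omega

lemma join_step (wl : List String) (i a : Int) (hi : 0 ≤ i) (hia : i < a)
    (ha : a < (wl.length : Int)) :
    PySem.Str.join " " (PySem.List.slice wl (some i) (some a)) ++ " " ++ PySem.List.pyGetD wl a ""
      = PySem.Str.join " " (PySem.List.slice wl (some i) (some (a + 1))) := by
  rw [slice_snoc wl i a hi hia ha,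
    str_join_append_singleton _ _ (slice_nonempty wl i a hi hia (by omega)),
    PySem.List.pyGetD_of_nonneg wl "" (by omega)]

lemma inner_loop (wl : List String) (i n : Int) (hn : n ≤ (wl.length : Int)) (hi : 0 ≤ i) :
    ∀ (k : Nat) (a : Int), (n - a).toNat = k → i < a →
      ∀ (acc : List String) (t : String),
        t = PySem.Str.join " " (PySem.List.slice wl (some i) (some a)) →
        ((PySem.List.pyRange a n 1).foldl
          (fun (st : List String × String) j =>
            (st.1 ++ [st.2 ++ " " ++ PySem.List.pyGetD wl j ""],
             st.2 ++ " " ++ PySem.List.pyGetD wl j "")) (acc, t)).1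
        = acc ++ (PySem.List.pyRange a n 1).map
            (fun j => PySem.Str.join " " (PySem.List.slice wl (some i) (some (j + 1)))) := by
  intro k
  induction k with
  | zero =>
    intro a hk _ acc t _
    rw [PySem.List.pyRange_one_eq_nil (by omega)]
    simp
  | succ k ih =>
    intro a hk hia acc t ht
    have han : a < n := by omega
    rw [PySem.List.pyRange_one_cons han]
    simp only [List.foldl_cons, List.map_cons]
    have hstep : t ++ " " ++ PySem.List.pyGetD wl a ""
        = PySem.Str.join " " (PySem.List.slice wl (some i) (some (a + 1))) := by
      rw [ht]; exact join_step wl i a hi hia (by omega)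
    rw [hstep, ih (a + 1) (by omega) (by omega) _ _ rfl]
    simp [List.append_assoc]

-- one outer iteration of A equals one outer iteration of B
lemma outer_step (wl : List String) (n i : Int) (hn : n ≤ (wl.length : Int))
    (hi : 0 ≤ i) (hin : i < n) (acc : List String) :
    (let substring := PySem.List.pyGetD wl i ""
     let substringList := acc ++ [substring]
     ((PySem.List.pyRange (i + 1) n 1).foldl
       (fun (st : List String × String) j =>
         let substring := st.2 ++ " " ++ PySem.List.pyGetD wl j ""
         (st.1 ++ [substring], substring))
       (substringList, substring)).1)
    = (PySem.List.pyRange i n 1).foldl (fun acc j =>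
        acc ++ [PySem.Str.join " " (PySem.List.slice wl (some i) (some (j + 1)))]) acc := by
  have hbase : PySem.List.pyGetD wl i ""
      = PySem.Str.join " " (PySem.List.slice wl (some i) (some (i + 1))) := by
    rw [slice_single wl i hi (by omega), PySem.List.pyGetD_of_nonneg wl "" hi]
    have : ∀ y : String, PySem.Str.join " " [y] = y := by
      intro y
      apply String.toList_injective
      simp [PySem.Str.join, PySem.Chars.join_singleton]
    rw [this]
  simp only []
  rw [inner_loop wl i n hn hi (n - (i + 1)).toNat (i + 1) rfl (by omega) _ _ hbase,
    PySem.List.foldl_append_singleton_eq_map, PySem.List.pyRange_one_cons hin,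
    List.map_cons, ← hbase]
  simp [List.append_assoc]

-- ===== VERDICT (by name: the statement is the Claim_ definition above) =====
theorem findSubstrings_spec : Claim_equal_findSubstrings := by
  unfold Claim_equal_findSubstrings
  intro s _
  unfold Spec_findSubstrings findSubstrings findSubstrings_alt countWords
  simp only []
  set n : Int := (((PySem.Str.split? (PySem.Str.strip s) " ").getD []).length : Int) with hn
  set wl : List String := (PySem.Str.split? s " ").getD [] with hwl
  have hle : n ≤ (wl.length : Int) := numWords_le s
  apply PySem.List.foldl_congr_mem
  intro acc i hi
  have hmem := (PySem.List.mem_pyRange_one).1 hi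
  exact outer_step wl n i hle hmem.1 hmem.2 acc
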